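-- pv_equiv track=rewrite | github.com/rileydrellishak/adagrams-py | adagrams/game.py | uses_available_letters
-- ===== SOURCE A (Python) =====
-- def build_frequency_map(word):
--     letter_frequency = {}
--     for letter in word:
--         letter_frequency[letter] = letter_frequency.get(letter, 0) + 1
--     return letter_frequency
--
-- def uses_available_letters(word, letter_bank):
--     """Checks if a player-submitted word only uses letters from the player's letter bank.
--
--     Args:
--         word (str): The word submitted by the player.
--         letter_bank (list): The list of letters the player has from drawing 10 tiles.
--
--     Returns:
--         bool: True if all letters in the submitted word are from letter pool. False if not. Will also return False if a letter's frequency in the word is greater than its frequency in the letter_bank.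
--     """
--     capitalize_word = word.upper()
--     word_letter_frequency = build_frequency_map(capitalize_word)
--     letter_bank_frequency = build_frequency_map(letter_bank)
--     for letter in capitalize_word:
--         if letter not in letter_bank_frequency.keys() or word_letter_frequency[letter] > letter_bank_frequency[letter]:
--             return False
--
--     return True
-- ===== SOURCE B (Python) =====
-- def uses_available_letters(word, letter_bank):
--     remaining = list(letter_bank)
--     for letter in word.upper():
--         if letter in remaining:
--             remaining.remove(letter)
--         else:
--             return False
--     return True
-- ===== Notes on version B (the rewrite author's own statement) =====
-- stated objective: simpler
-- what changed: Replaces the two precomputed frequency dictionaries with a shrinking working copy of the bank consumed tile-by-tile (membership test + remove-first-occurrence per letter).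
import Mathlib
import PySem

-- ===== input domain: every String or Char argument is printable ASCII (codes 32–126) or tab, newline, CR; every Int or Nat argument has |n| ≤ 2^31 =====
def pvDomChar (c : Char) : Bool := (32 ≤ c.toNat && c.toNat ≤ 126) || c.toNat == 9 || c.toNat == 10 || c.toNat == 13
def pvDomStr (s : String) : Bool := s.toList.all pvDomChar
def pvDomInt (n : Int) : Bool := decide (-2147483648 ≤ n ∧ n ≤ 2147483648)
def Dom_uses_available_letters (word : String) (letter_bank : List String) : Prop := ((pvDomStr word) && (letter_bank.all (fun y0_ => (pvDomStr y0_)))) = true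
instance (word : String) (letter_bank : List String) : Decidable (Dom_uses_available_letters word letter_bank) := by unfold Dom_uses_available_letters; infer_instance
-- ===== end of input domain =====

-- B replaces A's two frequency dictionaries with a shrinking working copy of the bank
-- consumed tile-by-tile (simpler decomposition; not claimed faster).

-- ===== PORT A =====
-- iterating a Python string yields length-1 strings, ported as String.singleton of each char
def build_frequency_map (word : List String) : PySem.Dict String Int :=
  word.foldl (fun d letter => d.insert letter (d.getD letter 0 + 1)) PySem.Dict.empty

-- the loop with early `return False`; wf[letter] never raises since letter ∈ word, so getD is exact
def pvLoopA (cw : List String) (wf bf : PySem.Dict String Int) : Bool :=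
  match cw with
  | [] => true
  | letter :: rest =>
    if bf.contains letter = false || wf.getD letter 0 > bf.getD letter 0 then false
    else pvLoopA rest wf bf

def uses_available_letters (word : String) (letter_bank : List String) : Bool :=
  let capitalize_word := (PySem.Str.upper word).toList.map (fun c => String.singleton c)
  let word_letter_frequency := build_frequency_map capitalize_word
  let letter_bank_frequency := build_frequency_map letter_bank
  pvLoopA capitalize_word word_letter_frequency letter_bank_frequency

-- ===== PORT B =====
def pvConsume (cw remaining : List String) : Bool :=
  match cw with
  | [] => true
  | letter :: rest =>
    if letter ∈ remaining then pvConsume rest (remaining.erase letter) else false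

def uses_available_letters_alt (word : String) (letter_bank : List String) : Bool :=
  pvConsume ((PySem.Str.upper word).toList.map (fun c => String.singleton c)) letter_bank

-- ===== PRECONDITION & SPEC =====
def Spec_uses_available_letters (word : String) (letter_bank : List String) (out : Bool) : Prop := out = uses_available_letters_alt word letter_bank
instance (word : String) (letter_bank : List String) (out : Bool) : Decidable (Spec_uses_available_letters word letter_bank out) := by unfold Spec_uses_available_letters; infer_instance

-- ===== CLAIM (what is proved, stated in full; the proofs are below) =====
def Claim_equal_uses_available_letters : Prop := ∀ (word : String) (letter_bank : List String), Dom_uses_available_letters word letter_bank → Spec_uses_available_letters word letter_bank (uses_available_letters word letter_bank)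

-- ===== LEMMAS AND PROOFS =====

theorem freq_getD (l : List String) (x : String) :
    (build_frequency_map l).getD x 0 = (l.count x : Int) := by
  unfold build_frequency_map
  rw [PySem.Dict.getD_foldl_insert_add_one]
  simp

theorem freq_contains (l : List String) (x : String) :
    (build_frequency_map l).contains x = (x ∈ l) := by
  unfold build_frequency_map
  rw [PySem.Dict.foldl_insert_getD_add_one_eq_counter, PySem.Dict.contains_counter]
  simp

theorem loopA_iff (L : List String) (wf bf : PySem.Dict String Int) :
    pvLoopA L wf bf = true ↔
      ∀ x ∈ L, bf.contains x = true ∧ wf.getD x 0 ≤ bf.getD x 0 := by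
  induction L with
  | nil => simp [pvLoopA]
  | cons a rest ih =>
    simp only [pvLoopA, List.mem_cons]
    by_cases hc : bf.contains a = true
    · by_cases hv : wf.getD a 0 > bf.getD a 0
      · simp only [hc, hv]
        constructor
        · intro h; simp at h
        · intro h
          exact absurd ((h a (Or.inl rfl)).2) (by omega)
      · have : (bf.contains a = false || decide (wf.getD a 0 > bf.getD a 0)) = false := by
          simp [hc, hv]
        rw [this]
        simp only [if_neg Bool.false_ne_true, ih]
        constructor
        · intro h x hx
          rcases hx with rfl | hx
          · exact ⟨hc, by omega⟩
          · exact h x hx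
        · intro h x hx; exact h x (Or.inr hx)
    · have hcf : bf.contains a = false := by
        cases h : bf.contains a with
        | true => exact absurd h hc
        | false => rfl
      simp only [hcf]
      constructor
      · intro h; simp at h
      · intro h
        exact absurd (h a (Or.inl rfl)).1 (by rw [hcf]; simp)

theorem consume_iff (L : List String) (bank : List String) :
    pvConsume L bank = true ↔ List.Subperm L bank := by
  induction L generalizing bank with
  | nil => simp [pvConsume, List.nil_subperm]
  | cons a rest ih =>
    simp only [pvConsume]
    by_cases hm : a ∈ bank
    · rw [if_pos hm, ih]
      have hperm : List.Perm bank (a :: bank.erase a) := List.perm_cons_erase hm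
      constructor
      · intro h
        exact ((List.subperm_cons a).mpr h).trans hperm.symm.subperm
      · intro h
        exact (List.subperm_cons a).mp (h.trans hperm.subperm)
    · rw [if_neg hm]
      constructor
      · intro h; simp at h
      · intro h
        exact absurd (h.subset (List.mem_cons_self)) hm

theorem a_iff (W bank : List String) :
    pvLoopA W (build_frequency_map W) (build_frequency_map bank) = true ↔ List.Subperm W bank := by
  rw [loopA_iff, List.subperm_ext_iff]
  constructor
  · intro h x hx
    have := (h x hx).2
    rw [freq_getD, freq_getD] at this
    exact_mod_cast this
  · intro h x hx
    refine ⟨?_, ?_⟩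
    · rw [freq_contains]
      have h1 : 0 < W.count x := List.count_pos_iff.mpr hx
      have h2 := h x hx
      have h3 : x ∈ bank := List.count_pos_iff.mp (by omega)
      simp [h3]
    · rw [freq_getD, freq_getD]
      exact_mod_cast h x hx

-- ===== VERDICT (by name: the statement is the Claim_ definition above) =====
theorem uses_available_letters_spec : Claim_equal_uses_available_letters := by
  intro word letter_bank _
  unfold Spec_uses_available_letters uses_available_letters uses_available_letters_alt
  rw [Bool.eq_iff_iff]
  rw [a_iff, consume_iff]
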